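-- pv_equiv track=rewrite | github.com/satori87/odyssey-snes | tools/generate_bsp_tables.py | generate_xtoviewangle
-- ===== SOURCE A (Python) =====
-- SCREENWIDTH = 112
--
-- FINEANGLES = 2048
--
-- def generate_xtoviewangle(viewangletox):
--     """xtoviewangle[113]: inverse of viewangletox"""
--     table = []
--     for x in range(SCREENWIDTH + 1):
--         i = 0
--         while i < len(viewangletox) and viewangletox[i] >= x:
--             i += 1
--         table.append(i - FINEANGLES // 4 - 1)
--     return table
-- ===== SOURCE B (Python) =====
-- SCREENWIDTH = 112
--
-- FINEANGLES = 2048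
--
-- def generate_xtoviewangle(viewangletox):
--     """xtoviewangle[113]: inverse of viewangletox"""
--     # Build the negated prefix-minimum array once (non-decreasing),
--     # then answer each x by binary search over it.
--     neg = []
--     m = None
--     for v in viewangletox:
--         if m is None or v < m:
--             m = v
--         neg.append(-m)
--     off = FINEANGLES // 4 + 1
--     out = []
--     for x in range(SCREENWIDTH + 1):
--         lo, hi = 0, len(neg)
--         while lo < hi:
--             mid = (lo + hi) // 2
--             if neg[mid] <= -x:
--                 lo = mid + 1
--             else:
--                 hi = mid
--         out.append(lo - off)
--     return out
-- ===== Notes on version B (the rewrite author's own statement) =====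
-- stated objective: faster
-- what changed: B builds the negated prefix-minimum array once (non-decreasing) and answers each x by binary search over it, instead of restarting a linear scan of viewangletox for every x.
import Mathlib
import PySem

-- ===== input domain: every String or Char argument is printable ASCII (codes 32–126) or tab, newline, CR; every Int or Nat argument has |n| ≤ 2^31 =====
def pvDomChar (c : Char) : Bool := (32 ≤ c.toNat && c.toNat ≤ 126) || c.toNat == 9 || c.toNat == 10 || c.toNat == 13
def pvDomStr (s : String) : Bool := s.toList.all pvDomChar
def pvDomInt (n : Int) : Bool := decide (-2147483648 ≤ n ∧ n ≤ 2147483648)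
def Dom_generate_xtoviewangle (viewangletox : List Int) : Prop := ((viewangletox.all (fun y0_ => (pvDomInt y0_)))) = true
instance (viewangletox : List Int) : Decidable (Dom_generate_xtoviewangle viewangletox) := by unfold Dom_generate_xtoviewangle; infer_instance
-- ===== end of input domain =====

-- B replaces A's per-x restarting linear scan by a once-built negated prefix-minimum
-- array queried by binary search (objective: faster, O(n + W log n) vs O(W n)).

-- ===== PORT A =====
-- 'while i < len(v) and v[i] >= x: i += 1' as the obvious structural recursion over the list
def pvScanA (x : Int) : List Int → Nat → Nat
  | [], i => i
  | v :: rest, i => if v ≥ x then pvScanA x rest (i + 1) else i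

def generate_xtoviewangle (viewangletox : List Int) : List Int :=
  (PySem.List.pyRange 0 (112 + 1) 1).map
    (fun x => (pvScanA x viewangletox 0 : Int) - PySem.Int.floordiv 2048 4 - 1)

-- ===== PORT B =====
-- negated prefix minima: state m is the running minimum (None before the first element)
def pvNegPrefix : List Int → Option Int → List Int
  | [], _ => []
  | v :: rest, m =>
      let m' := match m with
        | none => v
        | some m0 => if v < m0 then v else m0
      (-m') :: pvNegPrefix rest (some m')

-- binary search: first index lo with neg[lo] > -x (neg is non-decreasing);
-- neg.getD mid 0 is exact for Python's neg[mid] since lo ≤ mid < hi ≤ len here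
def pvBS (neg : List Int) (x : Int) (lo hi : Nat) : Nat :=
  if h : lo < hi then
    let mid := (lo + hi) / 2
    if neg.getD mid 0 ≤ -x then pvBS neg x (mid + 1) hi else pvBS neg x lo mid
  else lo
termination_by hi - lo
decreasing_by all_goals omega

def generate_xtoviewangle_alt (viewangletox : List Int) : List Int :=
  let neg := pvNegPrefix viewangletox none
  let off := PySem.Int.floordiv 2048 4 + 1
  (PySem.List.pyRange 0 (112 + 1) 1).map
    (fun x => (pvBS neg x 0 neg.length : Int) - off)

-- ===== PRECONDITION & SPEC =====
def Spec_generate_xtoviewangle (viewangletox : List Int) (out : List Int) : Prop := out = generate_xtoviewangle_alt viewangletox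
instance (viewangletox : List Int) (out : List Int) : Decidable (Spec_generate_xtoviewangle viewangletox out) := by unfold Spec_generate_xtoviewangle; infer_instance

-- ===== CLAIM (what is proved, stated in full; the proofs are below) =====
def Claim_equal_generate_xtoviewangle : Prop := ∀ (viewangletox : List Int), Dom_generate_xtoviewangle viewangletox → Spec_generate_xtoviewangle viewangletox (generate_xtoviewangle viewangletox)

-- ===== LEMMAS AND PROOFS =====

-- A's scan counts the prefix of elements ≥ x
theorem pvScanA_eq_takeWhile (x : Int) : ∀ (vs : List Int) (i : Nat),
    pvScanA x vs i = i + (vs.takeWhile (fun v => decide (v ≥ x))).length := by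
  intro vs
  induction vs with
  | nil => intro i; simp [pvScanA]
  | cons v rest ih =>
      intro i
      by_cases h : v ≥ x
      · simp [pvScanA, h, List.takeWhile, ih]; omega
      · simp [pvScanA, h, List.takeWhile]

-- every element of pvNegPrefix vs (some m0) is ≥ -m0
theorem pvNegPrefix_lb : ∀ (vs : List Int) (m0 : Int) (y : Int),
    y ∈ pvNegPrefix vs (some m0) → -m0 ≤ y := by
  intro vs
  induction vs with
  | nil => intro m0 y h; simp [pvNegPrefix] at h
  | cons v rest ih =>
      intro m0 y h
      simp only [pvNegPrefix, List.mem_cons] at h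
      rcases h with h | h
      · subst h; split <;> omega
      · have := ih _ _ h
        split at this <;> omega

theorem pvNegPrefix_pairwise : ∀ (vs : List Int) (m : Option Int),
    (pvNegPrefix vs m).Pairwise (· ≤ ·) := by
  intro vs
  induction vs with
  | nil => intro m; simp [pvNegPrefix]
  | cons v rest ih =>
      intro m
      simp only [pvNegPrefix]
      refine List.Pairwise.cons ?_ (ih _)
      intro y hy
      exact pvNegPrefix_lb rest _ y hy

-- getD-monotonicity from pairwise
theorem pairwise_getD_mono (l : List Int) (hl : l.Pairwise (· ≤ ·)) :
    ∀ i j, i ≤ j → j < l.length → l.getD i 0 ≤ l.getD j 0 := by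
  intro i j hij hj
  rcases Nat.eq_or_lt_of_le hij with rfl | hlt
  · exact le_refl _
  · have hi : i < l.length := Nat.lt_trans hlt hj
    rw [List.getD_eq_getElem l 0 hi, List.getD_eq_getElem l 0 hj]
    exact (List.pairwise_iff_getElem.mp hl) i j hi hj hlt

-- characterize takeWhile-length by a split point
theorem takeWhile_length_of_split (P : Int → Bool) : ∀ (l : List Int) (r : Nat),
    r ≤ l.length → (∀ i, i < r → P (l.getD i 0) = true) →
    (∀ i, r ≤ i → i < l.length → ¬ P (l.getD i 0) = true) →
    (l.takeWhile P).length = r := by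
  intro l
  induction l with
  | nil => intro r hr _ _; simp at hr; simp [hr]
  | cons a l ih =>
      intro r hr hlo hhi
      cases r with
      | zero =>
          have := hhi 0 (Nat.zero_le _) (by simp)
          simp only [List.getD_cons_zero] at this
          simp [List.takeWhile, Bool.eq_false_iff.mpr this]
      | succ r' =>
          have ha := hlo 0 (Nat.succ_pos _)
          simp only [List.getD_cons_zero] at ha
          have : (l.takeWhile P).length = r' := by
            refine ih r' (by simpa using hr) ?_ ?_
            · intro i hi
              have := hlo (i + 1) (by omega)
              simpa using this
            · intro i hri hil
              have := hhi (i + 1) (by omega) (by simpa using hil)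
              simpa using this
          simp [List.takeWhile, ha, this]

-- binary-search correctness via the loop invariant
theorem pvBS_inv (neg : List Int) (x : Int)
    (hmono : ∀ i j, i ≤ j → j < neg.length → neg.getD i 0 ≤ neg.getD j 0) :
    ∀ d lo hi, hi - lo = d → lo ≤ hi → hi ≤ neg.length →
    (∀ i, i < lo → neg.getD i 0 ≤ -x) →
    (∀ i, hi ≤ i → i < neg.length → ¬ neg.getD i 0 ≤ -x) →
    pvBS neg x lo hi = (neg.takeWhile (fun v => decide (v ≤ -x))).length := by
  intro d
  induction d using Nat.strong_induction_on with
  | _ d ih =>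
    intro lo hi hd hle hlen hlo hhi
    by_cases h : lo < hi
    · rw [pvBS, dif_pos h]
      set mid := (lo + hi) / 2 with hmid
      have hm1 : lo ≤ mid := by omega
      have hm2 : mid < hi := by omega
      by_cases hv : neg.getD mid 0 ≤ -x
      · rw [if_pos hv]
        refine ih (hi - (mid + 1)) (by omega) (mid + 1) hi rfl (by omega) hlen ?_ hhi
        intro i hi'
        exact le_trans (hmono i mid (by omega) (by omega)) hv
      · rw [if_neg hv]
        refine ih (mid - lo) (by omega) lo mid rfl (by omega) (by omega) hlo ?_
        intro i hmi hil h'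
        exact hv (le_trans (hmono mid i hmi hil) h')
    · rw [pvBS, dif_neg h]
      have : lo = hi := by omega
      subst this
      exact (takeWhile_length_of_split _ neg lo (by omega)
        (fun i hi' => by simpa using hlo i hi')
        (fun i h1 h2 => by simpa using hhi i h1 h2)).symm

-- the prefix of negated prefix-minima ≤ -x matches the prefix of elements ≥ x
theorem negPrefix_takeWhile (x : Int) : ∀ (vs : List Int) (m : Option Int),
    (∀ m0, m = some m0 → m0 ≥ x) →
    ((pvNegPrefix vs m).takeWhile (fun v => decide (v ≤ -x))).length
      = (vs.takeWhile (fun v => decide (v ≥ x))).length := by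
  intro vs
  induction vs with
  | nil => intro m _; simp [pvNegPrefix]
  | cons v rest ih =>
      intro m hm
      rcases m with _ | m0
      · -- m = none: m' = v
        simp only [pvNegPrefix]
        by_cases hv : v ≥ x
        · rw [List.takeWhile_cons_of_pos (by simp only [decide_eq_true_eq]; omega),
              List.takeWhile_cons_of_pos (by simpa using hv)]
          simpa using ih (some v) (fun m1 h => by injection h with h; omega)
        · rw [List.takeWhile_cons_of_neg (by simp only [decide_eq_true_eq]; omega),
              List.takeWhile_cons_of_neg (by simpa using hv)]
      · -- m = some m0: m' = min v m0
        have hm0 : m0 ≥ x := hm m0 rfl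
        simp only [pvNegPrefix]
        by_cases hv : v ≥ x
        · have hge : (if v < m0 then v else m0) ≥ x := by split <;> omega
          rw [List.takeWhile_cons_of_pos (by simp only [decide_eq_true_eq]; omega),
              List.takeWhile_cons_of_pos (by simpa using hv)]
          simpa using ih (some _) (fun m1 h => by injection h with h; omega)
        · have hlt : (if v < m0 then v else m0) < x := by split <;> omega
          rw [List.takeWhile_cons_of_neg (by simp only [decide_eq_true_eq]; omega),
              List.takeWhile_cons_of_neg (by simpa using hv)]

-- per-x equality of the two counts
theorem counts_eq (vs : List Int) (x : Int) :
    pvBS (pvNegPrefix vs none) x 0 (pvNegPrefix vs none).length = pvScanA x vs 0 := by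
  have hmono := pairwise_getD_mono (pvNegPrefix vs none) (pvNegPrefix_pairwise vs none)
  have h1 := pvBS_inv (pvNegPrefix vs none) x hmono ((pvNegPrefix vs none).length - 0)
    0 (pvNegPrefix vs none).length rfl (Nat.zero_le _) (le_refl _)
    (fun i hi => absurd hi (Nat.not_lt_zero i))
    (fun i h1 h2 => absurd (lt_of_le_of_lt h1 h2) (lt_irrefl _))
  rw [h1, pvScanA_eq_takeWhile, Nat.zero_add, negPrefix_takeWhile x vs none (by simp)]

-- ===== VERDICT (by name: the statement is the Claim_ definition above) =====
theorem generate_xtoviewangle_spec : Claim_equal_generate_xtoviewangle := by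
  intro vs _
  unfold Spec_generate_xtoviewangle generate_xtoviewangle generate_xtoviewangle_alt
  simp only []
  apply List.map_congr_left
  intro x _
  rw [counts_eq]
  ring
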